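-- pv_equiv track=rewrite | github.com/BradenLWeber/PathFinder | Pathfinder.py | findmouselocation
-- ===== SOURCE A (Python) =====
-- size = width, height = 1010, 794
--
-- box_size = 24
--
-- def findmouselocation(position):
--     '''Finds the coordinate of the box the mouse is in rather than the true coordinate of the mouse'''
--     for column in range(0, size[0], box_size):
--         for row in range(0, size[1], box_size):
--             if position[0] > column and position[0] < column + box_size and position[1] > row and position[1] < row + box_size:
--                 if (column, row) in [(size[0]-box_size*3-2, 0), (size[0]-box_size*2-2, 0), (size[0]-box_size-2, 0)]:
--                     return (2, 2)
--                 elif (column, row) in [(size[0]-box_size*3-2, box_size), (size[0]-box_size*2-2, box_size), (size[0]-box_size-2, box_size)]: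
--                     return (3, 3)
--                 elif (column, row) in [(size[0]-box_size*3-2, box_size*2), (size[0]-box_size*2-2, box_size*2), (size[0]-box_size-2, box_size*2)]:
--                     return (4, 4)
--                 elif (column, row) in [(size[0]-box_size*3-2, box_size*3), (size[0]-box_size*2-2, box_size*3), (size[0]-box_size-2, box_size*3)]:
--                     return (5, 5)
--                 else:
--                     return (column, row)
--     # If mouse is on line between boxes (1, 1) is returned
--     return (1, 1)
-- ===== SOURCE B (Python) =====
-- size = width, height = 1010, 794
--
-- box_size = 24
--
-- def findmouselocation(position):
--     '''Finds the coordinate of the box the mouse is in rather than the true coordinate of the mouse'''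
--     x = position[0]
--     xmax = (size[0] + box_size - 1) // box_size * box_size
--     if not (0 < x < xmax and x % box_size != 0):
--         return (1, 1)
--     y = position[1]
--     ymax = (size[1] + box_size - 1) // box_size * box_size
--     if not (0 < y < ymax and y % box_size != 0):
--         return (1, 1)
--     c = x // box_size * box_size
--     r = y // box_size * box_size
--     if c in (size[0] - box_size * 3 - 2, size[0] - box_size * 2 - 2, size[0] - box_size - 2) \
--             and r in (0, box_size, box_size * 2, box_size * 3):
--         return (r // box_size + 2, r // box_size + 2)
--     return (c, r)
-- ===== Notes on version B (the rewrite author's own statement) =====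
-- stated objective: simpler
-- what changed: Replaced the nested scan over all grid columns and rows with direct integer-division arithmetic (box = coordinate // box_size * box_size) plus range/divisibility checks and the same special-cell mapping.
import Mathlib
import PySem

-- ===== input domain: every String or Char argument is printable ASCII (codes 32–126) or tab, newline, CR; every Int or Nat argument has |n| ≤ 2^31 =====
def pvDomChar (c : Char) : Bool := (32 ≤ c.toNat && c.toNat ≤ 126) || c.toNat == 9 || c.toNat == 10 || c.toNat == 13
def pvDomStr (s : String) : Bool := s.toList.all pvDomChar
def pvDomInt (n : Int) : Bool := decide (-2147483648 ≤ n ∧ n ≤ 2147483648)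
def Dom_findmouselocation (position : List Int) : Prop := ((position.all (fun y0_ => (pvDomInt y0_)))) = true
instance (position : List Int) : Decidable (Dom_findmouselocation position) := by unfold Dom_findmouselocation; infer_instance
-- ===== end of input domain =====

-- B replaces A's nested scan over every grid column and row by direct integer-division
-- arithmetic with the same range checks and special-cell mapping (simpler; not measured faster).

-- ===== PORT A =====
-- the four special-cell membership tests and their results, in A's branch order
def pvSpecialAnswer (column row : Int) : List Int :=
  if (column, row) ∈ [((1010 - 24 * 3 - 2 : Int), (0 : Int)), (1010 - 24 * 2 - 2, 0), (1010 - 24 - 2, 0)] then [2, 2]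
  else if (column, row) ∈ [((1010 - 24 * 3 - 2 : Int), (24 : Int)), (1010 - 24 * 2 - 2, 24), (1010 - 24 - 2, 24)] then [3, 3]
  else if (column, row) ∈ [((1010 - 24 * 3 - 2 : Int), (24 * 2 : Int)), (1010 - 24 * 2 - 2, 24 * 2), (1010 - 24 - 2, 24 * 2)] then [4, 4]
  else if (column, row) ∈ [((1010 - 24 * 3 - 2 : Int), (24 * 3 : Int)), (1010 - 24 * 2 - 2, 24 * 3), (1010 - 24 - 2, 24 * 3)] then [5, 5]
  else [column, row]

-- inner 'for row in range(0, size[1], box_size)' with its early return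
def pvRowLoop (position : List Int) (column : Int) : List Int → Option (List Int)
  | [] => none
  | row :: rest =>
    if PySem.List.pyGetD position 0 0 > column ∧ PySem.List.pyGetD position 0 0 < column + 24 ∧
       PySem.List.pyGetD position 1 0 > row ∧ PySem.List.pyGetD position 1 0 < row + 24 then
      some (pvSpecialAnswer column row)
    else pvRowLoop position column rest

-- outer 'for column in range(0, size[0], box_size)'
def pvColLoop (position : List Int) : List Int → Option (List Int)
  | [] => none
  | column :: rest =>
    match pvRowLoop position column (PySem.List.pyRange 0 794 24) with
    | some v => some v
    | none => pvColLoop position rest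

def findmouselocation (position : List Int) : List Int :=
  (pvColLoop position (PySem.List.pyRange 0 1010 24)).getD [1, 1]

-- ===== PORT B =====
def findmouselocation_alt (position : List Int) : List Int :=
  let x := PySem.List.pyGetD position 0 0
  let xmax := PySem.Int.floordiv (1010 + 24 - 1) 24 * 24
  if ¬(0 < x ∧ x < xmax ∧ PySem.Int.mod x 24 ≠ 0) then [1, 1]
  else
    let y := PySem.List.pyGetD position 1 0
    let ymax := PySem.Int.floordiv (794 + 24 - 1) 24 * 24
    if ¬(0 < y ∧ y < ymax ∧ PySem.Int.mod y 24 ≠ 0) then [1, 1]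
    else
      let c := PySem.Int.floordiv x 24 * 24
      let r := PySem.Int.floordiv y 24 * 24
      if (c = 1010 - 24 * 3 - 2 ∨ c = 1010 - 24 * 2 - 2 ∨ c = 1010 - 24 - 2) ∧
         (r = 0 ∨ r = 24 ∨ r = 24 * 2 ∨ r = 24 * 3) then
        [PySem.Int.floordiv r 24 + 2, PySem.Int.floordiv r 24 + 2]
      else [c, r]

-- ===== PRECONDITION & SPEC =====
-- Pre_ excludes exactly the inputs on which Python A raises IndexError: the empty list,
-- and one-element lists whose coordinate would enter a column interval (so position[1] is read).
def Pre_findmouselocation (position : List Int) : Prop :=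
  2 ≤ position.length ∨
  (position.length = 1 ∧
    ¬(0 < PySem.List.pyGetD position 0 0 ∧ PySem.List.pyGetD position 0 0 < 1032 ∧
      PySem.List.pyGetD position 0 0 % 24 ≠ 0))
instance (position : List Int) : Decidable (Pre_findmouselocation position) := by
  unfold Pre_findmouselocation; infer_instance

def pvWitness_findmouselocation : List Int := [30, 30]

def Spec_findmouselocation (position : List Int) (out : List Int) : Prop := out = findmouselocation_alt position
instance (position : List Int) (out : List Int) : Decidable (Spec_findmouselocation position out) := by unfold Spec_findmouselocation; infer_instance

-- ===== CLAIM (what is proved, stated in full; the proofs are below) =====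
def Claim_equal_findmouselocation : Prop := ∀ (position : List Int), Dom_findmouselocation position → Pre_findmouselocation position → Spec_findmouselocation position (findmouselocation position)

-- ===== LEMMAS AND PROOFS =====

theorem rowLoop_none_of_xbad (position : List Int) (column : Int) (rows : List Int)
    (h : ¬(column < PySem.List.pyGetD position 0 0 ∧ PySem.List.pyGetD position 0 0 < column + 24)) :
    pvRowLoop position column rows = none := by
  induction rows with
  | nil => rfl
  | cons row rest ih =>
    rw [pvRowLoop, if_neg (by tauto)]
    exact ih

theorem rowLoop_none_of_ybad (position : List Int) (column : Int) (rows : List Int)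
    (hrows : ∀ r ∈ rows, (24 : Int) ∣ r ∧ 0 ≤ r ∧ r ≤ 792)
    (hy : ¬(0 < PySem.List.pyGetD position 1 0 ∧ PySem.List.pyGetD position 1 0 < 816 ∧
            ¬(24 : Int) ∣ PySem.List.pyGetD position 1 0)) :
    pvRowLoop position column rows = none := by
  induction rows with
  | nil => rfl
  | cons row rest ih =>
    have hr := hrows row (by simp)
    rw [pvRowLoop, if_neg (by
      intro hcond
      exact hy (by omega))]
    exact ih (fun r hr => hrows r (by simp [hr]))

theorem rowLoop_hit (position : List Int) (column : Int) (rows : List Int)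
    (hx : column < PySem.List.pyGetD position 0 0 ∧ PySem.List.pyGetD position 0 0 < column + 24)
    (hy : 0 < PySem.List.pyGetD position 1 0 ∧ PySem.List.pyGetD position 1 0 < 816 ∧
          ¬(24 : Int) ∣ PySem.List.pyGetD position 1 0)
    (hrows : ∀ r ∈ rows, (24 : Int) ∣ r)
    (hmem : (PySem.List.pyGetD position 1 0 / 24) * 24 ∈ rows) :
    pvRowLoop position column rows = some (pvSpecialAnswer column ((PySem.List.pyGetD position 1 0 / 24) * 24)) := by
  induction rows with
  | nil => simp at hmem
  | cons row rest ih =>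
    by_cases hrow : row = (PySem.List.pyGetD position 1 0 / 24) * 24
    · subst hrow
      rw [pvRowLoop, if_pos (by refine ⟨hx.1, hx.2, ?_, ?_⟩ <;> omega)]
    · have hd := hrows row (by simp)
      rw [pvRowLoop, if_neg (by
        intro hcond
        exact hrow (by omega))]
      refine ih (fun r hr => hrows r (by simp [hr])) ?_
      rcases List.mem_cons.mp hmem with h | h
      · exact absurd h.symm hrow
      · exact h

theorem colLoop_none_of_xbad (position : List Int) (cols : List Int)
    (hcols : ∀ c ∈ cols, (24 : Int) ∣ c ∧ 0 ≤ c ∧ c ≤ 1008)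
    (hx : ¬(0 < PySem.List.pyGetD position 0 0 ∧ PySem.List.pyGetD position 0 0 < 1032 ∧
            ¬(24 : Int) ∣ PySem.List.pyGetD position 0 0)) :
    pvColLoop position cols = none := by
  induction cols with
  | nil => rfl
  | cons c rest ih =>
    have hc := hcols c (by simp)
    rw [pvColLoop, rowLoop_none_of_xbad position c _ (by
      intro hcond
      exact hx (by omega))]
    exact ih (fun d hd => hcols d (by simp [hd]))

theorem rows_props : ∀ r ∈ PySem.List.pyRange 0 794 24, (24 : Int) ∣ r ∧ 0 ≤ r ∧ r ≤ 792 := by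
  decide

theorem colLoop_none_of_ybad (position : List Int) (cols : List Int)
    (hy : ¬(0 < PySem.List.pyGetD position 1 0 ∧ PySem.List.pyGetD position 1 0 < 816 ∧
            ¬(24 : Int) ∣ PySem.List.pyGetD position 1 0)) :
    pvColLoop position cols = none := by
  induction cols with
  | nil => rfl
  | cons c rest ih =>
    by_cases hc : c < PySem.List.pyGetD position 0 0 ∧ PySem.List.pyGetD position 0 0 < c + 24
    · rw [pvColLoop, rowLoop_none_of_ybad position c _ rows_props hy]
      exact ih
    · rw [pvColLoop, rowLoop_none_of_xbad position c _ hc]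
      exact ih

theorem colLoop_hit (position : List Int) (cols : List Int)
    (hx : 0 < PySem.List.pyGetD position 0 0 ∧ PySem.List.pyGetD position 0 0 < 1032 ∧
          ¬(24 : Int) ∣ PySem.List.pyGetD position 0 0)
    (hy : 0 < PySem.List.pyGetD position 1 0 ∧ PySem.List.pyGetD position 1 0 < 816 ∧
          ¬(24 : Int) ∣ PySem.List.pyGetD position 1 0)
    (hcols : ∀ c ∈ cols, (24 : Int) ∣ c)
    (hmem : (PySem.List.pyGetD position 0 0 / 24) * 24 ∈ cols) :
    pvColLoop position cols =
      some (pvSpecialAnswer ((PySem.List.pyGetD position 0 0 / 24) * 24)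
                            ((PySem.List.pyGetD position 1 0 / 24) * 24)) := by
  induction cols with
  | nil => simp at hmem
  | cons c rest ih =>
    by_cases hc : c = (PySem.List.pyGetD position 0 0 / 24) * 24
    · subst hc
      rw [pvColLoop, rowLoop_hit position _ _ (by constructor <;> omega) hy
        (fun r hr => (rows_props r hr).1) (by
          rw [PySem.List.mem_pyRange_iff_of_pos (by norm_num)]
          omega)]
    · have hd := hcols c (by simp)
      rw [pvColLoop, rowLoop_none_of_xbad position c _ (by
        intro hcond
        exact hc (by omega))]
      refine ih (fun d hdm => hcols d (by simp [hdm])) ?_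
      rcases List.mem_cons.mp hmem with h | h
      · exact absurd h.symm hc
      · exact h

theorem special_eq (x y : Int)
    (_hx : 0 < x ∧ x < 1032 ∧ ¬(24 : Int) ∣ x)
    (hy : 0 < y ∧ y < 816 ∧ ¬(24 : Int) ∣ y) :
    pvSpecialAnswer ((x / 24) * 24) ((y / 24) * 24) =
      (if ((x / 24) * 24 = 1010 - 24 * 3 - 2 ∨ (x / 24) * 24 = 1010 - 24 * 2 - 2 ∨
           (x / 24) * 24 = 1010 - 24 - 2) ∧
          ((y / 24) * 24 = 0 ∨ (y / 24) * 24 = 24 ∨ (y / 24) * 24 = 24 * 2 ∨ (y / 24) * 24 = 24 * 3) then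
        [PySem.Int.floordiv ((y / 24) * 24) 24 + 2, PySem.Int.floordiv ((y / 24) * 24) 24 + 2]
      else [(x / 24) * 24, (y / 24) * 24]) := by
  have hfd : PySem.Int.floordiv ((y / 24) * 24) 24 = y / 24 := by
    rw [PySem.Int.floordiv_eq_ediv_of_pos (by norm_num)]
    omega
  unfold pvSpecialAnswer
  simp only [List.mem_cons, Prod.mk.injEq, hfd]
  norm_num
  split_ifs <;> first
    | rfl
    | (simp_all; omega)

-- ===== VERDICT (by name: the statement is the Claim_ definition above) =====
theorem findmouselocation_spec : Claim_equal_findmouselocation := by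
  intro position _ _
  unfold Spec_findmouselocation findmouselocation
  simp only [findmouselocation_alt]
  have hmod_x : PySem.Int.mod (PySem.List.pyGetD position 0 0) 24 = 0 ↔
      (24 : Int) ∣ PySem.List.pyGetD position 0 0 := PySem.Int.mod_eq_zero_iff_dvd _ _
  have hmod_y : PySem.Int.mod (PySem.List.pyGetD position 1 0) 24 = 0 ↔
      (24 : Int) ∣ PySem.List.pyGetD position 1 0 := PySem.Int.mod_eq_zero_iff_dvd _ _
  have hxmax : PySem.Int.floordiv (1010 + 24 - 1) 24 * 24 = (1032 : Int) := by decide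
  have hymax : PySem.Int.floordiv (794 + 24 - 1) 24 * 24 = (816 : Int) := by decide
  rw [hxmax, hymax]
  by_cases hx : 0 < PySem.List.pyGetD position 0 0 ∧ PySem.List.pyGetD position 0 0 < 1032 ∧
      ¬(24 : Int) ∣ PySem.List.pyGetD position 0 0
  · have hcx : ¬¬(0 < PySem.List.pyGetD position 0 0 ∧ PySem.List.pyGetD position 0 0 < 1032 ∧
        PySem.Int.mod (PySem.List.pyGetD position 0 0) 24 ≠ 0) := by
      rw [not_not]
      exact ⟨hx.1, hx.2.1, fun h0 => hx.2.2 (hmod_x.mp h0)⟩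
    by_cases hy : 0 < PySem.List.pyGetD position 1 0 ∧ PySem.List.pyGetD position 1 0 < 816 ∧
        ¬(24 : Int) ∣ PySem.List.pyGetD position 1 0
    · have hcy : ¬¬(0 < PySem.List.pyGetD position 1 0 ∧ PySem.List.pyGetD position 1 0 < 816 ∧
          PySem.Int.mod (PySem.List.pyGetD position 1 0) 24 ≠ 0) := by
        rw [not_not]
        exact ⟨hy.1, hy.2.1, fun h0 => hy.2.2 (hmod_y.mp h0)⟩
      rw [colLoop_hit position _ hx hy
        (fun c hc => (by decide : ∀ c ∈ PySem.List.pyRange 0 1010 24, (24:Int) ∣ c ∧ 0 ≤ c ∧ c ≤ 1008) c hc |>.1)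
        (by
          rw [PySem.List.mem_pyRange_iff_of_pos (by norm_num)]
          omega)]
      simp only [Option.getD_some]
      rw [if_neg hcx, if_neg hcy]
      have hfx : PySem.Int.floordiv (PySem.List.pyGetD position 0 0) 24 =
          PySem.List.pyGetD position 0 0 / 24 :=
        PySem.Int.floordiv_eq_ediv_of_pos (by norm_num)
      have hfy : PySem.Int.floordiv (PySem.List.pyGetD position 1 0) 24 =
          PySem.List.pyGetD position 1 0 / 24 :=
        PySem.Int.floordiv_eq_ediv_of_pos (by norm_num)
      simp only [hfx, hfy]
      exact special_eq _ _ hx hy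
    · have hcy : ¬(0 < PySem.List.pyGetD position 1 0 ∧ PySem.List.pyGetD position 1 0 < 816 ∧
          PySem.Int.mod (PySem.List.pyGetD position 1 0) 24 ≠ 0) := by
        intro h0
        exact hy ⟨h0.1, h0.2.1, fun hd => h0.2.2 (hmod_y.mpr hd)⟩
      rw [colLoop_none_of_ybad position _ hy]
      simp only [Option.getD_none]
      rw [if_neg hcx, if_pos hcy]
  · have hcx : ¬(0 < PySem.List.pyGetD position 0 0 ∧ PySem.List.pyGetD position 0 0 < 1032 ∧
        PySem.Int.mod (PySem.List.pyGetD position 0 0) 24 ≠ 0) := by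
      intro h0
      exact hx ⟨h0.1, h0.2.1, fun hd => h0.2.2 (hmod_x.mpr hd)⟩
    rw [colLoop_none_of_xbad position _ (by decide) hx]
    simp only [Option.getD_none]
    rw [if_pos hcx]
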